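-- pv_equiv track=rewrite | github.com/paiml/depyler | examples/hard_grid_paths.py | count_paths_with_sum
-- ===== SOURCE A (Python) =====
-- def unique_paths(m: int, n: int) -> int:
--     """Count unique paths from top-left to bottom-right in m x n grid."""
--     dp: list[int] = [1] * n
--     i: int = 1
--     while i < m:
--         j: int = 1
--         while j < n:
--             dp[j] = dp[j] + dp[j - 1]
--             j = j + 1
--         i = i + 1
--     return dp[n - 1]
--
-- def count_paths_with_sum(m: int, n: int) -> int:
--     """Sum of unique_paths for all sub-grids from (1,1) to (m,n)."""
--     total: int = 0
--     r: int = 1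
--     while r <= m:
--         c: int = 1
--         while c <= n:
--             total = total + unique_paths(r, c)
--             c = c + 1
--         r = r + 1
--     return total
-- ===== SOURCE B (Python) =====
-- def count_paths_with_sum(m: int, n: int) -> int:
--     """Sum of unique_paths for all sub-grids from (1,1) to (m,n).
--
--     Single Pascal-triangle DP row shared across all sub-grids: after the
--     r-th update pass, row[c-1] == unique_paths(r, c), so one sum per row
--     accumulates a whole row of sub-grid counts at once (O(m*n) total).
--     """
--     if m <= 0 or n <= 0:
--         return 0
--     row = [1] * n
--     total = n
--     for _ in range(1, m):
--         for j in range(1, n):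
--             row[j] = row[j] + row[j - 1]
--         total = total + sum(row)
--     return total
-- ===== Notes on version B (the rewrite author's own statement) =====
-- stated objective: faster
-- what changed: A recomputes a fresh Pascal DP row for every (r,c) sub-grid (O(m^2*n^2)); B maintains one shared Pascal row, updating it once per r and adding its sum, so every unique_paths value is produced exactly once (O(m*n)).
import Mathlib
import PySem

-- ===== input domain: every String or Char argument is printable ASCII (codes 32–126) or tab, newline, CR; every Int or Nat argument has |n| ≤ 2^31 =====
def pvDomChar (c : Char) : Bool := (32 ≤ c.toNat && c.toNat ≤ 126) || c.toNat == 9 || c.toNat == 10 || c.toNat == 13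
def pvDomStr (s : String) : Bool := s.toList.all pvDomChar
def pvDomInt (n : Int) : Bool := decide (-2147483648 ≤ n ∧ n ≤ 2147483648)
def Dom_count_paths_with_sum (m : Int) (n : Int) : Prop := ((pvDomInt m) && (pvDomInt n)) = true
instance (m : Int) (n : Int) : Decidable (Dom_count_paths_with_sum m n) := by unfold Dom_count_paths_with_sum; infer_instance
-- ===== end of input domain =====

-- B replaces A's per-sub-grid Pascal-row recomputation by ONE shared Pascal row updated once per
-- row index and summed as it goes (objective: faster).

-- ===== PORT A =====
-- inner 'while j < n' of unique_paths; dp[j], dp[j-1] are in range whenever the guard holds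
def upInner (dp : List Int) (j : Int) (n : Int) : List Int :=
  if j < n then
    upInner (dp.set j.toNat (((PySem.List.pyGet? dp j).getD 0) + ((PySem.List.pyGet? dp (j-1)).getD 0))) (j+1) n
  else dp
termination_by (n - j).toNat
decreasing_by simp; omega

-- outer 'while i < m' of unique_paths
def upOuter (dp : List Int) (i : Int) (m : Int) (n : Int) : List Int :=
  if i < m then upOuter (upInner dp 1 n) (i+1) m n else dp
termination_by (m - i).toNat
decreasing_by simp; omega

-- Python's final dp[n-1] raises IndexError iff n ≤ 0; count_paths_with_sum only calls
-- unique_paths with n ≥ 1, where the .getD 0 default is unreachable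
def unique_paths (m : Int) (n : Int) : Int :=
  (PySem.List.pyGet? (upOuter (List.replicate n.toNat 1) 1 m n) (n-1)).getD 0

-- inner 'while c <= n' of count_paths_with_sum
def cpsInner (r : Int) (c : Int) (n : Int) (total : Int) : Int :=
  if c ≤ n then cpsInner r (c+1) n (total + unique_paths r c) else total
termination_by (n + 1 - c).toNat
decreasing_by simp; omega

-- outer 'while r <= m'
def cpsOuter (r : Int) (m : Int) (n : Int) (total : Int) : Int :=
  if r ≤ m then cpsOuter (r+1) m n (cpsInner r 1 n total) else total
termination_by (m + 1 - r).toNat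
decreasing_by simp; omega

def count_paths_with_sum (m : Int) (n : Int) : Int := cpsOuter 1 m n 0

-- ===== PORT B =====
-- 'for j in range(1, n): row[j] = row[j] + row[j-1]'
def altInner (row : List Int) (n : Nat) : List Int :=
  (List.range' 1 (n-1)).foldl (fun acc j => acc.set j ((acc.getD j 0) + (acc.getD (j-1) 0))) row

def count_paths_with_sum_alt (m : Int) (n : Int) : Int :=
  if m ≤ 0 ∨ n ≤ 0 then 0
  else
    ((List.range' 1 (m.toNat - 1)).foldl
      (fun (st : List Int × Int) _ =>
        let row := altInner st.1 n.toNat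
        (row, st.2 + row.sum))
      (List.replicate n.toNat 1, n)).2

-- ===== PRECONDITION & SPEC =====
def Spec_count_paths_with_sum (m : Int) (n : Int) (out : Int) : Prop := out = count_paths_with_sum_alt m n
instance (m : Int) (n : Int) (out : Int) : Decidable (Spec_count_paths_with_sum m n out) := by unfold Spec_count_paths_with_sum; infer_instance

-- ===== CLAIM (what is proved, stated in full; the proofs are below) =====
def Claim_equal_count_paths_with_sum : Prop := ∀ (m : Int) (n : Int), Dom_count_paths_with_sum m n → Spec_count_paths_with_sum m n (count_paths_with_sum m n)

-- ===== LEMMAS AND PROOFS =====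

-- one Pascal pass with running carry: each element becomes old value + carry
def pstep : Int → List Int → List Int
  | _, [] => []
  | a, x :: xs => (x + a) :: pstep (x + a) xs

-- one full in-place pass 'for j in 1..len-1: L[j] += L[j-1]'
def pascalStep : List Int → List Int
  | [] => []
  | x :: xs => x :: pstep x xs

-- the Pascal row after i passes over a row of n ones
def rowI (i : Nat) (n : Nat) : List Int := pascalStep^[i] (List.replicate n 1)

theorem length_pstep (a : Int) (L : List Int) : (pstep a L).length = L.length := by
  induction L generalizing a with
  | nil => rfl
  | cons x xs ih => simp [pstep, ih]

theorem length_pascalStep (L : List Int) : (pascalStep L).length = L.length := by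
  cases L with
  | nil => rfl
  | cons x xs => simp [pascalStep, length_pstep]

theorem length_rowI (i n : Nat) : (rowI i n).length = n := by
  induction i with
  | zero => simp [rowI]
  | succ k ih => simpa [rowI, Function.iterate_succ_apply', length_pascalStep] using ih

theorem take_pstep (a : Int) (L : List Int) (c : Nat) :
    (pstep a L).take c = pstep a (L.take c) := by
  induction L generalizing a c with
  | nil => simp [pstep]
  | cons x xs ih =>
    cases c with
    | zero => simp [pstep]
    | succ c' => simp [pstep, ih]

theorem take_pascalStep (L : List Int) (c : Nat) :
    (pascalStep L).take c = pascalStep (L.take c) := by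
  cases L with
  | nil => simp [pascalStep]
  | cons x xs =>
    cases c with
    | zero => simp [pascalStep]
    | succ c' => simp [pascalStep, take_pstep]

theorem take_rowI (i : Nat) (c n : Nat) (h : c ≤ n) :
    (rowI i n).take c = rowI i c := by
  induction i with
  | zero => simp [rowI, List.take_replicate, Nat.min_eq_left h]
  | succ k ih =>
    simp only [rowI, Function.iterate_succ_apply', take_pascalStep] at ih ⊢
    rw [ih]

-- A's inner loop, decomposed: done prefix q ++ [c] (carry c = last written value), rest to do
theorem upInner_decomp (rest : List Int) : ∀ (q : List Int) (c : Int),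
    upInner ((q ++ [c]) ++ rest) ((q.length + 1 : Nat) : Int) ((q.length + 1 + rest.length : Nat) : Int)
      = (q ++ [c]) ++ pstep c rest := by
  induction rest with
  | nil =>
    intro q c
    rw [upInner]
    simp [pstep]
  | cons x rest' ih =>
    intro q c
    rw [upInner]
    rw [if_pos (by exact_mod_cast (by simp : q.length + 1 < q.length + 1 + (x :: rest').length))]
    have hg1 : PySem.List.pyGet? ((q ++ [c]) ++ x :: rest') ((q.length + 1 : Nat) : Int) = some x := by
      have := PySem.List.pyGet?_append_length (pre := q ++ [c]) (y := x) (ys := rest')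
      simpa using this
    have hg2 : PySem.List.pyGet? ((q ++ [c]) ++ x :: rest') (((q.length + 1 : Nat) : Int) - 1) = some c := by
      have h := PySem.List.pyGet?_append_length (pre := q) (y := c) (ys := x :: rest')
      have he : (((q.length + 1 : Nat) : Int) - 1) = ((q.length : Nat) : Int) := by push_cast; ring
      rw [he]
      simp
    rw [hg1, hg2]
    simp only [Option.getD_some]
    have hset : (((q ++ [c]) ++ x :: rest').set (((q.length + 1 : Nat) : Int)).toNat (x + c))
        = ((q ++ [c]) ++ [x + c]) ++ rest' := by
      have ht : (((q.length + 1 : Nat) : Int)).toNat = (q ++ [c]).length := by simp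
      rw [ht, List.set_append_right _ _ (le_refl _)]
      simp
    rw [hset]
    have h2 := ih (q ++ [c]) (x + c)
    simp only [List.length_append, List.length_cons, List.length_nil] at h2 ⊢
    push_cast at h2 ⊢
    simpa [pstep, add_assoc, add_comm, add_left_comm] using h2

-- B's inner loop, same decomposition
theorem altInner_decomp (rest : List Int) : ∀ (q : List Int) (c : Int),
    (List.range' (q.length + 1) rest.length).foldl
        (fun acc j => acc.set j ((acc.getD j 0) + (acc.getD (j-1) 0))) ((q ++ [c]) ++ rest)
      = (q ++ [c]) ++ pstep c rest := by
  induction rest with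
  | nil => intro q c; simp [pstep]
  | cons x rest' ih =>
    intro q c
    show (List.range' (q.length + 1) (rest'.length + 1)).foldl _ _ = _
    rw [List.range'_succ]
    simp only [List.foldl_cons]
    have hgx : ((q ++ [c]) ++ x :: rest').getD (q.length + 1) 0 = x := by
      have h : q.length + 1 = (q ++ [c]).length := by simp
      rw [h]
      simp [List.getD]
    have hgc : ((q ++ [c]) ++ x :: rest').getD (q.length + 1 - 1) 0 = c := by
      have h : (q ++ [c]) ++ x :: rest' = q ++ c :: (x :: rest') := by simp
      rw [h]
      simp [List.getD]
    rw [hgx, hgc]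
    have hset : (((q ++ [c]) ++ x :: rest').set (q.length + 1) (x + c))
        = ((q ++ [c]) ++ [x + c]) ++ rest' := by
      have h : q.length + 1 = (q ++ [c]).length := by simp
      rw [h, List.set_append_right _ _ (le_refl _)]
      simp
    rw [hset]
    have h2 := ih (q ++ [c]) (x + c)
    simp only [List.length_append, List.length_cons, List.length_nil] at h2 ⊢
    simpa [pstep, add_assoc, add_comm, add_left_comm] using h2

theorem upInner_one (dp : List Int) :
    upInner dp 1 ((dp.length : Nat) : Int) = pascalStep dp := by
  cases dp with
  | nil =>
    rw [upInner]
    simp [pascalStep]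
  | cons h t =>
    have := upInner_decomp t [] h
    simpa [pascalStep, add_comm] using this

theorem altInner_one (dp : List Int) :
    altInner dp dp.length = pascalStep dp := by
  cases dp with
  | nil => simp [altInner, pascalStep]
  | cons h t =>
    have := altInner_decomp t [] h
    simpa [altInner, pascalStep] using this

theorem upOuter_iter : ∀ (k : Nat) (dp : List Int) (i m n : Int),
    i + (k : Int) = m → n = (dp.length : Int) →
    upOuter dp i m n = pascalStep^[k] dp := by
  intro k
  induction k with
  | zero =>
    intro dp i m n hk _
    rw [upOuter]
    rw [if_neg (by omega)]
    rfl
  | succ k' ih =>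
    intro dp i m n hk hn
    rw [upOuter]
    rw [if_pos (by push_cast at hk; omega)]
    rw [hn, upInner_one]
    rw [ih (pascalStep dp) (i+1) m ((dp.length : Nat) : Int) (by push_cast at hk ⊢; omega) (by rw [length_pascalStep])]
    rw [← Function.iterate_succ_apply]

-- unique_paths r c for r ≥ 1, c ≥ 1 is entry c-1 of Pascal row r-1
theorem unique_paths_spec (r c : Int) (hr : 1 ≤ r) (hc : 1 ≤ c) :
    unique_paths r c = (rowI (r-1).toNat c.toNat).getD (c.toNat - 1) 0 := by
  unfold unique_paths
  rw [upOuter_iter (r-1).toNat (List.replicate c.toNat 1) 1 r c (by omega) (by simp; omega)]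
  have hrow : pascalStep^[(r-1).toNat] (List.replicate c.toNat 1) = rowI (r-1).toNat c.toNat := rfl
  rw [hrow]
  have hc1 : c - 1 = ((c.toNat - 1 : Nat) : Int) := by omega
  rw [hc1, PySem.List.pyGet?_natCast]
  have hlt : c.toNat - 1 < (rowI (r-1).toNat c.toNat).length := by
    rw [length_rowI]; omega
  simp [List.getD]

theorem cpsInner_spec : ∀ (k : Nat) (r c n total : Int), 1 ≤ r → 1 ≤ c → c + (k : Int) = n + 1 →
    cpsInner r c n total = total + ((rowI (r-1).toNat n.toNat).drop (c.toNat - 1)).sum := by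
  intro k
  induction k with
  | zero =>
    intro r c n total hr hc hk
    rw [cpsInner, if_neg (by omega)]
    rw [List.drop_eq_nil_of_le (by rw [length_rowI]; omega)]
    simp
  | succ k' ih =>
    intro r c n total hr hc hk
    rw [cpsInner, if_pos (by push_cast at hk; omega)]
    rw [ih r (c+1) n (total + unique_paths r c) hr (by omega) (by push_cast at hk ⊢; omega)]
    have hcn : c.toNat ≤ n.toNat := by push_cast at hk; omega
    have hup : unique_paths r c = (rowI (r-1).toNat n.toNat).getD (c.toNat - 1) 0 := by
      rw [unique_paths_spec r c hr hc, ← take_rowI (r-1).toNat c.toNat n.toNat hcn]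
      simp [List.getD, (by omega : c.toNat - 1 < c.toNat)]
    have hlt : c.toNat - 1 < (rowI (r-1).toNat n.toNat).length := by rw [length_rowI]; omega
    have hdrop : (rowI (r-1).toNat n.toNat).drop (c.toNat - 1)
        = (rowI (r-1).toNat n.toNat)[c.toNat - 1] :: (rowI (r-1).toNat n.toNat).drop (c.toNat - 1 + 1) :=
      List.drop_eq_getElem_cons hlt
    have hc1 : (c+1).toNat - 1 = c.toNat - 1 + 1 := by omega
    have hgd : (rowI (r-1).toNat n.toNat).getD (c.toNat - 1) 0 = (rowI (r-1).toNat n.toNat)[c.toNat - 1] :=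
      List.getD_eq_getElem _ _ hlt
    rw [hc1, hdrop, hup, hgd, List.sum_cons]
    ring

theorem cpsOuter_spec : ∀ (k : Nat) (r m n total : Int), 1 ≤ r → 1 ≤ n → r + (k : Int) = m + 1 →
    cpsOuter r m n total
      = total + ((List.range k).map (fun i => (rowI (r.toNat - 1 + i) n.toNat).sum)).sum := by
  intro k
  induction k with
  | zero =>
    intro r m n total _ _ hk
    rw [cpsOuter, if_neg (by omega)]
    simp
  | succ k' ih =>
    intro r m n total hr hn hk
    rw [cpsOuter, if_pos (by push_cast at hk; omega)]
    have hin : cpsInner r 1 n total = total + (rowI (r-1).toNat n.toNat).sum := by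
      rw [cpsInner_spec n.toNat r 1 n total hr le_rfl (by omega)]
      simp
    rw [ih (r+1) m n _ (by omega) hn (by push_cast at hk ⊢; omega), hin]
    rw [List.range_succ_eq_map, List.map_cons, List.map_map, List.sum_cons]
    have hf : ((fun i => (rowI (r.toNat - 1 + i) n.toNat).sum) ∘ Nat.succ)
        = (fun i => (rowI ((r+1).toNat - 1 + i) n.toNat).sum) := by
      funext i
      simp only [Function.comp]
      congr 2
      omega
    have hr1 : (r - 1).toNat = r.toNat - 1 + 0 := by omega
    rw [hf, hr1]
    ring

theorem altFold_spec (n : Nat) :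
    ∀ (k a i : Nat) (T : Int),
    (List.range' a k).foldl
        (fun (st : List Int × Int) _ =>
          let row := altInner st.1 n
          (row, st.2 + row.sum))
        (rowI i n, T)
      = (rowI (i + k) n, T + ((List.range k).map (fun t => (rowI (i + 1 + t) n).sum)).sum) := by
  intro k
  induction k with
  | zero => intro a i T; simp
  | succ k' ih =>
    intro a i T
    rw [List.range'_succ, List.foldl_cons]
    have hstep : altInner (rowI i n) n = rowI (i+1) n := by
      have h := altInner_one (rowI i n)
      rw [length_rowI] at h
      rw [h, rowI, rowI, Function.iterate_succ_apply']
    simp only [hstep]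
    rw [ih (a+1) (i+1) (T + (rowI (i+1) n).sum)]
    rw [List.range_succ_eq_map, List.map_cons, List.map_map, List.sum_cons]
    simp only [Prod.mk.injEq]
    refine ⟨by congr 1; omega, ?_⟩
    have hf : ((fun t => (rowI (i + 1 + t) n).sum) ∘ Nat.succ)
        = (fun t => (rowI (i + 1 + 1 + t) n).sum) := by
      funext t
      simp only [Function.comp]
      congr 2
      omega
    rw [hf]
    ring

-- trivial runs: n ≤ 0 makes every cpsInner a no-op, so cpsOuter returns its accumulator
theorem cpsOuter_nonpos : ∀ (k : Nat) (r m n total : Int), n ≤ 0 → r + (k : Int) = m + 1 →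
    cpsOuter r m n total = total := by
  intro k
  induction k with
  | zero => intro r m n total _ hk; rw [cpsOuter, if_neg (by omega)]
  | succ k' ih =>
    intro r m n total hn hk
    rw [cpsOuter, if_pos (by push_cast at hk; omega)]
    rw [cpsInner, if_neg (by omega)]
    exact ih (r+1) m n total hn (by push_cast at hk ⊢; omega)

-- ===== VERDICT (by name: the statement is the Claim_ definition above) =====
theorem count_paths_with_sum_spec : Claim_equal_count_paths_with_sum := by
  intro m n _
  unfold Spec_count_paths_with_sum count_paths_with_sum count_paths_with_sum_alt
  by_cases hm : m ≤ 0
  · rw [if_pos (Or.inl hm), cpsOuter, if_neg (by omega)]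
  · by_cases hn : n ≤ 0
    · rw [if_pos (Or.inr hn)]
      exact cpsOuter_nonpos m.toNat 1 m n 0 hn (by omega)
    · rw [Int.not_le] at hm hn
      rw [if_neg (by omega)]
      have hrep : List.replicate n.toNat (1:Int) = rowI 0 n.toNat := rfl
      rw [hrep, altFold_spec n.toNat (m.toNat - 1) 1 0 n]
      rw [cpsOuter_spec m.toNat 1 m n 0 le_rfl (by omega) (by omega)]
      have hm1 : m.toNat = (m.toNat - 1) + 1 := by omega
      rw [hm1, List.range_succ_eq_map, List.map_cons, List.map_map, List.sum_cons]
      have hz : (rowI (Int.toNat 1 - 1 + 0) n.toNat).sum = n := by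
        simp [rowI, List.sum_replicate]
        omega
      rw [hz]
      have hf : ((fun i => (rowI (Int.toNat 1 - 1 + i) n.toNat).sum) ∘ Nat.succ)
          = (fun t => (rowI (0 + 1 + t) n.toNat).sum) := by
        funext t
        simp only [Function.comp]
        congr 2
        omega
      rw [hf]
      norm_num
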